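-- pv_equiv track=rewrite | github.com/YimiAChack/GraphSTONE | src/preprocess.py | random_to_anonymous_walk
-- ===== SOURCE A (Python) =====
-- def random_to_anonymous_walk(random_walk_seq):
--     """convert a random walk sequence to an anonymous walk
--     """
--     cnt = 0
--     node_cnt = dict()
--     anonymous_walk_seq = []
--     for node in random_walk_seq:
--         if node not in node_cnt:
--             cnt += 1
--             node_cnt[node] = cnt
--         anonymous_walk_seq.append(node_cnt[node])
--
--     return anonymous_walk_seq
-- ===== SOURCE B (Python) =====
-- def random_to_anonymous_walk(random_walk_seq):
--     """convert a random walk sequence to an anonymous walk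
--
--     A node's anonymous index is the number of distinct nodes seen up to and
--     including its first occurrence, so it can be computed per element from
--     the sequence alone, with no dictionary and no running counter.
--     """
--     return [len(set(random_walk_seq[:random_walk_seq.index(node) + 1]))
--             for node in random_walk_seq]
-- ===== Notes on version B (the rewrite author's own statement) =====
-- stated objective: alternative
-- what changed: Replaces A's single-pass stateful loop (counter + dict + output list) with a stateless per-element computation: each node's index is recomputed from scratch as the number of distinct elements in the prefix ending at that node's first occurrence (list.index + set of a slice), with no dictionary and no counter.
import Mathlib
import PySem

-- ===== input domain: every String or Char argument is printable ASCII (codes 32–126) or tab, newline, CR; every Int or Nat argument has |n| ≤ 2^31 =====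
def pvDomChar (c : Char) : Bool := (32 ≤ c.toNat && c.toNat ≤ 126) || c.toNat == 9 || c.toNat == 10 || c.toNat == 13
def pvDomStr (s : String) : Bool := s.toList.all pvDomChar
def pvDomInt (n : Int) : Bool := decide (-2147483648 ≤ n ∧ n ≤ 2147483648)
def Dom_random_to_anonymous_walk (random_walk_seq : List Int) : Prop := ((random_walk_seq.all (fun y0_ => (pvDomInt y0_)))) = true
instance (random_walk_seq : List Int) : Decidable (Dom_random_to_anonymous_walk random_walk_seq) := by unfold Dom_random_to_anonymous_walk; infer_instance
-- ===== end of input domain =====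

-- B replaces A's single-pass stateful loop (counter + dict) with a stateless per-element
-- computation: each node's index is the number of distinct elements in the prefix ending at
-- that node's first occurrence (alternative algorithm, not faster).


-- ===== PORT A =====
-- the body of A's for-loop: state = (cnt, node_cnt, anonymous_walk_seq)
def pvStepA (st : Int × PySem.Dict Int Int × List Int) (node : Int) :
    Int × PySem.Dict Int Int × List Int :=
  let cnt := st.1
  let node_cnt := st.2.1
  let cnt' := if node_cnt.contains node then cnt else cnt + 1
  let node_cnt' := if node_cnt.contains node then node_cnt else node_cnt.insert node (cnt + 1)
  (cnt', node_cnt', st.2.2 ++ [node_cnt'.getD node 0])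

def random_to_anonymous_walk (random_walk_seq : List Int) : List Int :=
  (random_walk_seq.foldl pvStepA (0, PySem.Dict.empty, [])).2.2

-- ===== PORT B =====
-- [len(set(seq[:seq.index(node)+1])) for node in seq]; list.index never raises here since
-- node is drawn from the list itself (the none branch is unreachable).
def random_to_anonymous_walk_alt (random_walk_seq : List Int) : List Int :=
  random_walk_seq.map (fun node =>
    match PySem.List.index? random_walk_seq node with
    | some j =>
        ((PySem.Set.ofList (PySem.List.slice random_walk_seq none (some ((j : Int) + 1)))).length : Int)
    | none => 0)

-- ===== PRECONDITION & SPEC =====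
def Spec_random_to_anonymous_walk (random_walk_seq : List Int) (out : List Int) : Prop := out = random_to_anonymous_walk_alt random_walk_seq
instance (random_walk_seq : List Int) (out : List Int) : Decidable (Spec_random_to_anonymous_walk random_walk_seq out) := by unfold Spec_random_to_anonymous_walk; infer_instance

-- ===== CLAIM (what is proved, stated in full; the proofs are below) =====
def Claim_equal_random_to_anonymous_walk : Prop := ∀ (random_walk_seq : List Int), Dom_random_to_anonymous_walk random_walk_seq → Spec_random_to_anonymous_walk random_walk_seq (random_to_anonymous_walk random_walk_seq)

-- ===== LEMMAS AND PROOFS =====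

-- the first-seen index table A builds, as a function of the distinct-node list
def pvDictOf (L : List Int) : PySem.Dict Int Int :=
  (PySem.List.enumerate L 1).foldl (fun d p => d.insert p.2 p.1) PySem.Dict.empty

theorem pvEnumFold_get? (L : List Int) (s : Int) (d : PySem.Dict Int Int) (x : Int)
    (h : L.Nodup) :
    ((PySem.List.enumerate L s).foldl (fun d p => d.insert p.2 p.1) d).get? x
      = if x ∈ L then some (s + (L.idxOf x : Int)) else d.get? x := by
  induction L generalizing s d with
  | nil => simp
  | cons y ys ih =>
    rcases List.nodup_cons.mp h with ⟨hy, hys⟩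
    rw [PySem.List.enumerate_cons]
    simp only [List.foldl_cons]
    rw [ih _ _ hys]
    by_cases hx : x ∈ ys
    · have hxy : x ≠ y := fun e => hy (e ▸ hx)
      simp [hx, hxy, List.idxOf_cons_ne _ (Ne.symm hxy)]
      ring
    · rw [PySem.Dict.get?_insert]
      by_cases hxy : x = y
      · subst hxy; simp [hx]
      · simp [hx, hxy]

theorem pvDictOf_get? (L : List Int) (x : Int) (h : L.Nodup) :
    (pvDictOf L).get? x = if x ∈ L then some (1 + (L.idxOf x : Int)) else none := by
  unfold pvDictOf
  rw [pvEnumFold_get? L 1 _ x h]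
  simp [PySem.Dict.get?_empty]

theorem pvDictOf_snoc (L : List Int) (x : Int) (_hx : x ∉ L) :
    pvDictOf (L ++ [x]) = (pvDictOf L).insert x (1 + (L.length : Int)) := by
  unfold pvDictOf
  have henum : ∀ (M : List Int) (s : Int),
      PySem.List.enumerate (M ++ [x]) s = PySem.List.enumerate M s ++ [(s + M.length, x)] := by
    intro M
    induction M with
    | nil => intro s; simp [PySem.List.enumerate_cons]
    | cons a t ih =>
        intro s
        rw [List.cons_append, PySem.List.enumerate_cons, ih, PySem.List.enumerate_cons]
        simp; ring_nf
  rw [henum, List.foldl_append]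
  simp

theorem pvAdd_mem (s : List Int) (x : Int) (h : x ∈ s) : PySem.Set.add s x = s := by
  simp [PySem.Set.add, h]

theorem pvAdd_not_mem (s : List Int) (x : Int) (h : x ∉ s) :
    PySem.Set.add s x = s ++ [x] := by
  simp [PySem.Set.add, h]

theorem pvFoldlAdd_prefix (xs seen : List Int) :
    ∃ t, xs.foldl PySem.Set.add seen = seen ++ t := by
  induction xs generalizing seen with
  | nil => exact ⟨[], by simp⟩
  | cons x xs ih =>
    simp only [List.foldl_cons]
    by_cases hx : x ∈ seen
    · rw [pvAdd_mem _ _ hx]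
      exact ih seen
    · rw [pvAdd_not_mem _ _ hx]
      rcases ih (seen ++ [x]) with ⟨t, ht⟩
      exact ⟨x :: t, by rw [ht]; simp⟩

theorem pvNodup_snoc (s : List Int) (x : Int) (hnd : s.Nodup) (hx : x ∉ s) :
    (s ++ [x]).Nodup := by
  simp [List.nodup_append, hnd]
  intro a ha e
  exact hx (e ▸ ha)

theorem pvFoldlAdd_nodup (xs seen : List Int) (h : seen.Nodup) :
    (xs.foldl PySem.Set.add seen).Nodup := by
  induction xs generalizing seen with
  | nil => simpa
  | cons x xs ih =>
    simp only [List.foldl_cons]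
    apply ih
    by_cases hx : x ∈ seen
    · rwa [pvAdd_mem _ _ hx]
    · rw [pvAdd_not_mem _ _ hx]
      exact pvNodup_snoc _ _ h hx

-- A's output, characterised: each emitted value is the first-seen index in the final distinct list
theorem pvMain (xs : List Int) : ∀ (seen acc : List Int), seen.Nodup →
    (xs.foldl pvStepA ((seen.length : Int), pvDictOf seen, acc)).2.2
      = acc ++ xs.map (fun x =>
          (pvDictOf (xs.foldl PySem.Set.add seen)).getD x 0) := by
  induction xs with
  | nil => intro seen acc _; simp
  | cons x xs ih =>
    intro seen acc hnd
    have hcontains : (pvDictOf seen).contains x = decide (x ∈ seen) := by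
      rw [PySem.Dict.contains_eq_isSome_get?, pvDictOf_get? seen x hnd]
      by_cases hx : x ∈ seen <;> simp [hx]
    have hfinal : ∀ seen' : List Int, seen'.Nodup → x ∈ seen' →
        (pvDictOf (xs.foldl PySem.Set.add seen')).getD x 0 = 1 + (seen'.idxOf x : Int) := by
      intro seen' hnd' hx
      rcases pvFoldlAdd_prefix xs seen' with ⟨t, ht⟩
      have hnd'' : (seen' ++ t).Nodup := ht ▸ pvFoldlAdd_nodup xs seen' hnd'
      rw [PySem.Dict.getD_eq_get?_getD, ht, pvDictOf_get? _ x hnd'']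
      simp [List.mem_append.mpr (Or.inl hx), List.idxOf_append_of_mem hx]
    simp only [List.foldl_cons, List.map_cons]
    by_cases hx : x ∈ seen
    · have hstep : pvStepA ((seen.length : Int), pvDictOf seen, acc) x
          = ((seen.length : Int), pvDictOf seen, acc ++ [1 + (seen.idxOf x : Int)]) := by
        simp only [pvStepA, hcontains, hx, decide_true, if_true]
        rw [PySem.Dict.getD_eq_get?_getD, pvDictOf_get? seen x hnd]
        simp [hx]
      rw [hstep, ih seen _ hnd, pvAdd_mem _ _ hx, hfinal seen hnd hx]
      simp
    · have hins : (pvDictOf seen).insert x ((seen.length : Int) + 1)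
          = pvDictOf (seen ++ [x]) := by
        rw [pvDictOf_snoc seen x hx]; ring_nf
      have hstep : pvStepA ((seen.length : Int), pvDictOf seen, acc) x
          = (((seen ++ [x]).length : Int), pvDictOf (seen ++ [x]),
             acc ++ [(seen.length : Int) + 1]) := by
        simp only [pvStepA, hcontains, hx, decide_false, Bool.false_eq_true, if_false]
        rw [PySem.Dict.getD_eq_get?_getD, PySem.Dict.get?_insert_self, hins]
        simp
      have hnd' : (seen ++ [x]).Nodup := pvNodup_snoc _ _ hnd hx
      rw [hstep, ih (seen ++ [x]) _ hnd', pvAdd_not_mem _ _ hx,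
        hfinal (seen ++ [x]) hnd' (by simp)]
      have hidx : ((seen ++ [x]).idxOf x : Int) = (seen.length : Int) := by
        rw [List.idxOf_append_of_notMem hx]
        simp
      rw [hidx]
      simp
      ring_nf

-- B's per-element count equals A's first-seen index: the number of distinct elements in the
-- prefix through x's first occurrence is 1 + x's position in the distinct-node list.
theorem pvPrefixCount (xs : List Int) : ∀ (s : List Int) (x : Int) (j : Nat),
    s.Nodup → x ∉ s → PySem.List.index? xs x = some j →
    ((xs.take (j + 1)).foldl PySem.Set.add s).length
      = (xs.foldl PySem.Set.add s).idxOf x + 1 := by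
  induction xs with
  | nil => intro s x j _ _ h; simp [PySem.List.index?] at h
  | cons y ys ih =>
    intro s x j hnd hxs hidx
    by_cases hxy : x = y
    · subst hxy
      rw [PySem.List.index?_cons_self] at hidx
      have hj : j = 0 := by simpa using hidx.symm
      subst hj
      simp only [List.take_succ_cons, List.take_zero, List.foldl_cons, List.foldl_nil]
      rw [pvAdd_not_mem _ _ hxs]
      rcases pvFoldlAdd_prefix ys (s ++ [x]) with ⟨t, ht⟩
      rw [ht, List.append_assoc, List.idxOf_append_of_notMem hxs]
      simp
    · rw [PySem.List.index?_cons_of_ne _ (fun e => hxy e.symm)] at hidx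
      rcases Option.map_eq_some_iff.mp hidx with ⟨j', hj', hjj⟩
      subst hjj
      simp only [List.take_succ_cons, List.foldl_cons]
      by_cases hy : y ∈ s
      · rw [pvAdd_mem _ _ hy]
        exact ih s x j' hnd hxs hj'
      · rw [pvAdd_not_mem _ _ hy]
        exact ih (s ++ [y]) x j' (pvNodup_snoc _ _ hnd hy)
          (by simp; exact ⟨hxs, hxy⟩) hj'

-- ===== VERDICT (by name: the statement is the Claim_ definition above) =====
theorem random_to_anonymous_walk_spec : Claim_equal_random_to_anonymous_walk := by
  intro seq _
  unfold Spec_random_to_anonymous_walk random_to_anonymous_walk random_to_anonymous_walk_alt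
  have hA := pvMain seq [] [] List.nodup_nil
  simp only [List.length_nil, Int.natCast_zero] at hA
  rw [show (pvDictOf ([] : List Int)) = PySem.Dict.empty from rfl] at hA
  rw [hA]
  simp only [List.nil_append]
  apply List.map_congr_left
  intro x hx
  obtain ⟨j, hmem⟩ := Option.isSome_iff_exists.mp
    ((PySem.List.index?_isSome_iff seq x).mpr hx)
  rw [hmem]
  show (pvDictOf (seq.foldl PySem.Set.add [])).getD x 0
      = ((PySem.Set.ofList (PySem.List.slice seq none (some ((j : Int) + 1)))).length : Int)
  have hslice : PySem.List.slice seq none (some ((j : Int) + 1))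
      = seq.take (j + 1) := by
    have := PySem.List.slice_to_natCast seq (j + 1)
    push_cast at this ⊢
    exact this
  rw [hslice]
  have hcount := pvPrefixCount seq [] x j List.nodup_nil (by simp) hmem
  have hdict : (pvDictOf (seq.foldl PySem.Set.add [])).getD x 0
      = 1 + ((seq.foldl PySem.Set.add []).idxOf x : Int) := by
    have hnd := pvFoldlAdd_nodup seq [] List.nodup_nil
    have hxmem : x ∈ seq.foldl PySem.Set.add [] := by
      rw [← PySem.Set.ofList_eq_foldl]
      exact (PySem.Set.mem_ofList _ _).mpr hx
    rw [PySem.Dict.getD_eq_get?_getD, pvDictOf_get? _ x hnd]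
    simp [hxmem]
  rw [hdict, show PySem.Set.ofList (seq.take (j + 1))
      = (seq.take (j + 1)).foldl PySem.Set.add [] from PySem.Set.ofList_eq_foldl _,
    hcount]
  push_cast
  ring
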